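-- pv_equiv track=rewrite | github.com/AroldoFe/SegurancaRedes | Atividade 02/2 - Segredo de César/decifrar_mensagem.py | voltar_msg_original
-- ===== SOURCE A (Python) =====
-- def voltar_msg_original(mensagem, decriptada):
-- 	msg_decript = ""
-- 	ind_dec = 0
--
-- 	for i in range(len(mensagem)):
-- 		if(mensagem[i] == " "):
-- 			msg_decript += " "
-- 			continue
-- 		else:
-- 			msg_decript += decriptada[ind_dec]
-- 			ind_dec += 1
--
-- 	return msg_decript
-- ===== SOURCE B (Python) =====
-- def voltar_msg_original(mensagem, decriptada):
--     pieces = mensagem.split(' ')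
--     out = []
--     pos = 0
--     for p in pieces:
--         out.append(decriptada[pos:pos + len(p)])
--         pos += len(p)
--     return ' '.join(out)
-- ===== Notes on version B (the rewrite author's own statement) =====
-- stated objective: faster
-- what changed: Instead of A's char-by-char scan with a running index into decriptada (one string += per character), B splits mensagem on spaces, carves consecutive word-sized slices out of decriptada, and joins them with ' '.join.
import Mathlib
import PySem

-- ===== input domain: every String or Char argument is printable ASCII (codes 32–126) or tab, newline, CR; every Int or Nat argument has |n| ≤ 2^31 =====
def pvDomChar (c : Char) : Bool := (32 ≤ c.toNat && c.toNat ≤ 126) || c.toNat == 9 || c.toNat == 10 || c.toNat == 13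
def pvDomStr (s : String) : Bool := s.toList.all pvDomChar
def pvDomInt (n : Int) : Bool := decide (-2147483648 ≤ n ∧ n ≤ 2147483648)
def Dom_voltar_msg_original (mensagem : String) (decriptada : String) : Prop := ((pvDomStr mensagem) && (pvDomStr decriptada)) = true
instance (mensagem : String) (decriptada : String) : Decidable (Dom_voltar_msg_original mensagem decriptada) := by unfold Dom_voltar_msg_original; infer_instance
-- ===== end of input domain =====

-- B rebuilds the message from word-sized slices of decriptada (split on spaces + join) instead of A's per-character scan; return values are proved equal wherever A returns (Pre_).

-- ===== PORT A =====
-- literal port of A's loop: accumulate characters, advancing an index into decriptada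
-- on each non-space; the pyGet? is always in range under Pre_ (out of range Python raises
-- IndexError, excluded by Pre_).
def voltar_msg_original (mensagem : String) (decriptada : String) : String :=
  let d := decriptada.toList
  let st := mensagem.toList.foldl
    (fun (st : List Char × Nat) c =>
      if c = ' ' then (st.1 ++ [' '], st.2)
      else (st.1 ++ [((PySem.List.pyGet? d ((st.2 : Nat) : Int)).getD ' ')], st.2 + 1))
    (([] : List Char), 0)
  String.mk st.1

-- ===== PORT B =====
-- literal port of Source B: split mensagem on ' ', fold over the pieces carving
-- consecutive slices of decriptada, join the slices with spaces.
def voltar_msg_original_alt (mensagem : String) (decriptada : String) : String :=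
  let d := decriptada.toList
  let pieces := PySem.Chars.splitOn mensagem.toList [' ']
  let st := pieces.foldl
    (fun (st : List (List Char) × Nat) p =>
      (st.1 ++ [PySem.List.slice d (some ((st.2 : Nat) : Int)) (some (((st.2 : Nat) : Int) + ((p.length : Nat) : Int)))], st.2 + p.length))
    (([] : List (List Char)), 0)
  String.mk (PySem.Chars.join [' '] st.1)

-- ===== PRECONDITION & SPEC =====
-- Pre_ excludes exactly the inputs where A raises IndexError: decriptada shorter than
-- the number of non-space characters of mensagem.
def Pre_voltar_msg_original (mensagem : String) (decriptada : String) : Prop :=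
  (mensagem.toList.filter (fun c => ¬ c = ' ')).length ≤ decriptada.toList.length

instance (mensagem : String) (decriptada : String) : Decidable (Pre_voltar_msg_original mensagem decriptada) := by
  unfold Pre_voltar_msg_original; infer_instance

def pvWitness_voltar_msg_original : String × String := ("ab c", "xyz")

def Spec_voltar_msg_original (mensagem : String) (decriptada : String) (out : String) : Prop := out = voltar_msg_original_alt mensagem decriptada
instance (mensagem : String) (decriptada : String) (out : String) : Decidable (Spec_voltar_msg_original mensagem decriptada out) := by unfold Spec_voltar_msg_original; infer_instance

-- ===== CLAIM (what is proved, stated in full; the proofs are below) =====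
def Claim_equal_voltar_msg_original : Prop := ∀ (mensagem : String) (decriptada : String), Dom_voltar_msg_original mensagem decriptada → Pre_voltar_msg_original mensagem decriptada → Spec_voltar_msg_original mensagem decriptada (voltar_msg_original mensagem decriptada)

-- ===== LEMMAS AND PROOFS =====

-- the common value both ports compute: spaces stay, successive chars of d replace non-spaces
def pvG (d : List Char) : List Char → Nat → List Char
  | [], _ => []
  | c :: cs, k => if c = ' ' then ' ' :: pvG d cs k else d.getD k ' ' :: pvG d cs (k + 1)

-- simple structural split-on-space (Python str.split(' ') semantics)
def pvSp : List Char → List (List Char)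
  | [] => [[]]
  | c :: cs =>
    if c = ' ' then [] :: pvSp cs
    else
      match pvSp cs with
      | [] => [[c]]
      | p :: ps => (c :: p) :: ps

def pvConsHead (x : List Char) : List (List Char) → List (List Char)
  | [] => [x]
  | p :: ps => (x ++ p) :: ps

def pvSlices (d : List Char) : List (List Char) → Nat → List (List Char)
  | [], _ => []
  | p :: ps, k =>
    PySem.List.slice d (some ((k : Nat) : Int)) (some (((k : Nat) : Int) + ((p.length : Nat) : Int))) :: pvSlices d ps (k + p.length)

theorem pvSp_ne_nil (cs : List Char) : pvSp cs ≠ [] := by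
  cases cs with
  | nil => simp [pvSp]
  | cons c cs =>
    by_cases h : c = ' '
    · simp [pvSp, h]
    · simp only [pvSp, h, if_false]
      cases pvSp cs <;> simp

theorem pvFoldA (d : List Char) (cs : List Char) : ∀ (acc : List Char) (k : Nat),
    (cs.foldl
      (fun (st : List Char × Nat) c =>
        if c = ' ' then (st.1 ++ [' '], st.2)
        else (st.1 ++ [((PySem.List.pyGet? d ((st.2 : Nat) : Int)).getD ' ')], st.2 + 1))
      (acc, k)).1 = acc ++ pvG d cs k := by
  induction cs with
  | nil => intro acc k; simp [pvG]
  | cons c cs ih =>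
    intro acc k
    simp only [List.foldl_cons]
    by_cases h : c = ' '
    · rw [if_pos h, ih]; simp [pvG, h]
    · rw [if_neg h, ih]; simp [pvG, h, List.getD_eq_getElem?_getD]

theorem pvFoldB (d : List Char) (ps : List (List Char)) : ∀ (acc : List (List Char)) (k : Nat),
    (ps.foldl
      (fun (st : List (List Char) × Nat) p =>
        (st.1 ++ [PySem.List.slice d (some ((st.2 : Nat) : Int)) (some (((st.2 : Nat) : Int) + ((p.length : Nat) : Int)))], st.2 + p.length))
      (acc, k)).1 = acc ++ pvSlices d ps k := by
  induction ps with
  | nil => intro acc k; simp [pvSlices]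
  | cons p ps ih => intro acc k; simp [pvSlices, ih]

theorem pvGo : ∀ (fuel : Nat) (cs cur : List Char) (acc : List (List Char)),
    cs.length ≤ fuel →
    PySem.Chars.splitOn.go [' '] fuel cs cur acc = acc.reverse ++ pvConsHead cur.reverse (pvSp cs) := by
  intro fuel
  induction fuel with
  | zero =>
    intro cs cur acc h
    have : cs = [] := List.length_eq_zero_iff.mp (Nat.le_zero.mp h)
    subst this
    simp [PySem.Chars.splitOn.go, pvSp, pvConsHead]
  | succ fuel ih =>
    intro cs cur acc h
    cases cs with
    | nil => simp [PySem.Chars.splitOn.go, pvSp, pvConsHead]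
    | cons c rest =>
      by_cases hc : c = ' '
      · subst hc
        have hpre : ([' '] : List Char).isPrefixOf (' ' :: rest) = true := by
          simp [List.isPrefixOf]
        rw [PySem.Chars.splitOn.go]
        simp only [hpre, if_true, List.length_cons, List.length_nil, List.drop_succ_cons, List.drop_zero]
        rw [ih rest [] (cur.reverse :: acc) (by simpa using Nat.le_of_succ_le_succ h)]
        have hne := pvSp_ne_nil rest
        cases hsp : pvSp rest with
        | nil => exact absurd hsp hne
        | cons p ps => simp [pvSp, pvConsHead, hsp]
      · have hpre : ([' '] : List Char).isPrefixOf (c :: rest) = false := by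
          simp [List.isPrefixOf]
          intro h'; exact hc h'.symm
        rw [PySem.Chars.splitOn.go]
        simp only [hpre, Bool.false_eq_true, if_false]
        rw [ih rest (c :: cur) acc (by simpa using Nat.le_of_succ_le_succ h)]
        cases hsp : pvSp rest with
        | nil => exact absurd hsp (pvSp_ne_nil rest)
        | cons p ps => simp [pvSp, hc, hsp, pvConsHead]

theorem pvSplitOn_eq (cs : List Char) : PySem.Chars.splitOn cs [' '] = pvSp cs := by
  unfold PySem.Chars.splitOn
  rw [pvGo (cs.length + 1) cs [] [] (Nat.le_succ _)]
  cases hsp : pvSp cs with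
  | nil => exact absurd hsp (pvSp_ne_nil cs)
  | cons p ps => simp [pvConsHead]

theorem pvInterHead (sep : List Char) (a : Char) (q : List Char) (qs : List (List Char)) :
    sep.intercalate ((a :: q) :: qs) = a :: sep.intercalate (q :: qs) := by
  cases qs <;> simp [List.intercalate, List.intersperse]

theorem pvInterSpace (q : List Char) (qs : List (List Char)) :
    ([' '] : List Char).intercalate ([] :: q :: qs) = ' ' :: ([' '] : List Char).intercalate (q :: qs) := by
  simp [List.intercalate, List.intersperse]

theorem pvSliceCons (d : List Char) (k n : Nat) (h : k < d.length) :
    PySem.List.slice d (some ((k : Nat) : Int)) (some (((k : Nat) : Int) + (((n + 1 : Nat)) : Int))) =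
      d.getD k ' ' :: PySem.List.slice d (some (((k + 1 : Nat)) : Int)) (some ((((k + 1 : Nat)) : Int) + ((n : Nat) : Int))) := by
  rw [PySem.List.slice_natCast_add, PySem.List.slice_natCast_add]
  simp only [List.getD_eq_getElem?_getD, List.getElem?_eq_getElem h, Option.getD_some]
  rw [List.drop_eq_getElem_cons h, List.take_succ_cons]

theorem pvMain (d : List Char) (cs : List Char) : ∀ (k : Nat),
    k + (cs.filter (fun c => ¬ c = ' ')).length ≤ d.length →
    ([' '] : List Char).intercalate (pvSlices d (pvSp cs) k) = pvG d cs k := by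
  induction cs with
  | nil =>
    intro k _
    simp [pvSp, pvSlices, pvG, PySem.List.slice_natCast, List.intercalate]
  | cons c cs ih =>
    intro k hk
    by_cases hc : c = ' '
    · subst hc
      have hk' : k + (cs.filter (fun c => ¬ c = ' ')).length ≤ d.length := by
        simpa using hk
      cases hsp : pvSp cs with
      | nil => exact absurd hsp (pvSp_ne_nil cs)
      | cons p ps =>
        have hspc : pvSp (' ' :: cs) = [] :: p :: ps := by simp [pvSp, hsp]
        rw [hspc]
        have h0 : pvSlices d ([] :: p :: ps) k = [] :: PySem.List.slice d (some ((k : Nat) : Int)) (some (((k : Nat) : Int) + ((p.length : Nat) : Int))) :: pvSlices d ps (k + p.length) := by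
          simp [pvSlices, PySem.List.slice_natCast]
        rw [h0, pvInterSpace]
        rw [show (PySem.List.slice d (some ((k : Nat) : Int)) (some (((k : Nat) : Int) + ((p.length : Nat) : Int))) :: pvSlices d ps (k + p.length)) = pvSlices d (p :: ps) k from rfl]
        rw [← hsp, ih k hk']
        simp [pvG]
    · have hcons : (cs.filter (fun c => ¬ c = ' ')).length + 1 = ((c :: cs).filter (fun c => ¬ c = ' ')).length := by
        simp [hc]
      have hklt : k < d.length := by omega
      have hk' : (k + 1) + (cs.filter (fun c => ¬ c = ' ')).length ≤ d.length := by omega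
      cases hsp : pvSp cs with
      | nil => exact absurd hsp (pvSp_ne_nil cs)
      | cons p ps =>
        have hspc : pvSp (c :: cs) = (c :: p) :: ps := by simp [pvSp, hc, hsp]
        rw [hspc]
        simp only [pvSlices, List.length_cons]
        rw [pvSliceCons d k p.length hklt]
        rw [pvInterHead]
        have harg : k + (p.length + 1) = (k + 1) + p.length := by omega
        rw [harg]
        have hps : PySem.List.slice d (some (((k + 1 : Nat)) : Int)) (some ((((k + 1 : Nat)) : Int) + ((p.length : Nat) : Int))) :: pvSlices d ps ((k + 1) + p.length) = pvSlices d (p :: ps) (k + 1) := by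
          simp [pvSlices]
        rw [hps, ← hsp, ih (k + 1) hk']
        simp [pvG, hc]

-- ===== VERDICT (by name: the statement is the Claim_ definition above) =====
theorem voltar_msg_original_spec : Claim_equal_voltar_msg_original := by
  intro mensagem decriptada _ hpre
  unfold Spec_voltar_msg_original voltar_msg_original voltar_msg_original_alt
  simp only []
  rw [pvFoldA decriptada.toList mensagem.toList [] 0,
      pvFoldB decriptada.toList (PySem.Chars.splitOn mensagem.toList [' ']) [] 0]
  rw [pvSplitOn_eq]
  unfold PySem.Chars.join
  simp only [List.nil_append]
  rw [pvMain decriptada.toList mensagem.toList 0 (by simpa [Pre_voltar_msg_original] using hpre)]
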